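-- pv_equiv track=rewrite | github.com/Ashiq-am/Path-of-Python | 3.Data Types/Arrays Set 1 and Set 2/Prefix Sum/Queries to count numbers from given range which are divisible by all its digits/Queries to count numbers from given range which are divisible by all its digits.py | CheckDivByAllDigits
-- ===== SOURCE A (Python) =====
-- def CheckDivByAllDigits(number):
--     # Stores the number
--     n = number
--
--     # Iterate over the digits
--     # of the numbers
--     while (n > 0):
--
--         # If digit of number
--         # is non-zero
--         if (n % 10):
--
--             # If number is not divisible
--             # by its current digit
--             if (number % (n % 10)):
--                 return False
--
--         # Update n
--         n //= 10
--     return True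
-- ===== SOURCE B (Python) =====
-- def _gcd(a, b):
--     while b:
--         a, b = b, a % b
--     return a
--
--
-- def CheckDivByAllDigits(number):
--     # Accumulate the LCM of the non-zero digits, then do one divisibility test.
--     n = number
--     lcm = 1
--     while n > 0:
--         d = n % 10
--         if d:
--             lcm = lcm * d // _gcd(lcm, d)
--         n //= 10
--     return number % lcm == 0
-- ===== Notes on version B (the rewrite author's own statement) =====
-- stated objective: alternative
-- what changed: Instead of testing number % digit with an early return for each non-zero digit, B accumulates the LCM of the non-zero digits (with a hand-written Euclid gcd) in the same digit-extraction loop and performs a single final divisibility test number % lcm == 0.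
import Mathlib
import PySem

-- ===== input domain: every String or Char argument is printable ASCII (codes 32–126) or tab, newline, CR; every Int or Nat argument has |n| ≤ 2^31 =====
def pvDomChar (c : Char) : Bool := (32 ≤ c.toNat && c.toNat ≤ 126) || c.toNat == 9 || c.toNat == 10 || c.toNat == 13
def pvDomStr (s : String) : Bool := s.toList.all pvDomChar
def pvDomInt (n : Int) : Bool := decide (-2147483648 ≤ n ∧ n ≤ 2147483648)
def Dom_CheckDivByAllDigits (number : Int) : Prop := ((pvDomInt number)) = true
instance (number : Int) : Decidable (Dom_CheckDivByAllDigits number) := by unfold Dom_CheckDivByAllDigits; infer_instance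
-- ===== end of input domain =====

-- B replaces A's per-digit early-return divisibility tests by accumulating the LCM
-- of the non-zero digits and doing one final divisibility test (objective: alternative).

-- ===== PORT A =====
-- while (n > 0): if n % 10 and number % (n % 10): return False; n //= 10
def CheckDivByAllDigitsLoop (number n : Int) : Bool :=
  if _h : 0 < n then
    if PySem.Int.mod n 10 ≠ 0 then
      if PySem.Int.mod number (PySem.Int.mod n 10) ≠ 0 then false
      else CheckDivByAllDigitsLoop number (PySem.Int.floordiv n 10)
    else CheckDivByAllDigitsLoop number (PySem.Int.floordiv n 10)
  else true
termination_by n.toNat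
decreasing_by
  all_goals
    rw [PySem.Int.floordiv_eq_ediv_of_pos (by omega : (0:Int) < 10)]; omega

def CheckDivByAllDigits (number : Int) : Bool :=
  CheckDivByAllDigitsLoop number number

-- ===== PORT B =====
-- def _gcd(a, b): while b: a, b = b, a % b; return a
def pyGcd (a b : Int) : Int :=
  if _h : b ≠ 0 then pyGcd b (PySem.Int.mod a b) else a
termination_by b.natAbs
decreasing_by
  by_cases hb : 0 < b
  · have h1 := PySem.Int.mod_nonneg a hb
    have h2 := PySem.Int.mod_lt a hb
    omega
  · have h3 := PySem.Int.mod_neg_bounds a (b := b) (by omega)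
    omega

-- while n > 0: d = n % 10; if d: lcm = lcm * d // _gcd(lcm, d); n //= 10
-- return number % lcm == 0
def CheckDivByAllDigitsAltLoop (number n lcm : Int) : Bool :=
  if _h : 0 < n then
    CheckDivByAllDigitsAltLoop number (PySem.Int.floordiv n 10)
      (if PySem.Int.mod n 10 ≠ 0 then
        PySem.Int.floordiv (lcm * PySem.Int.mod n 10) (pyGcd lcm (PySem.Int.mod n 10))
       else lcm)
  else decide (PySem.Int.mod number lcm = 0)
termination_by n.toNat
decreasing_by
  rw [PySem.Int.floordiv_eq_ediv_of_pos (by omega : (0:Int) < 10)]; omega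

def CheckDivByAllDigits_alt (number : Int) : Bool :=
  CheckDivByAllDigitsAltLoop number number 1

-- ===== PRECONDITION & SPEC =====
def Spec_CheckDivByAllDigits (number : Int) (out : Bool) : Prop := out = CheckDivByAllDigits_alt number
instance (number : Int) (out : Bool) : Decidable (Spec_CheckDivByAllDigits number out) := by unfold Spec_CheckDivByAllDigits; infer_instance

-- ===== CLAIM (what is proved, stated in full; the proofs are below) =====
def Claim_equal_CheckDivByAllDigits : Prop := ∀ (number : Int), Dom_CheckDivByAllDigits number → Spec_CheckDivByAllDigits number (CheckDivByAllDigits number)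

-- ===== LEMMAS AND PROOFS =====

-- Python's gcd loop computes Int.gcd on nonnegative inputs.
theorem pyGcd_eq (k : Nat) : ∀ (a b : Int), b.natAbs ≤ k → 0 ≤ a → 0 ≤ b →
    pyGcd a b = (Int.gcd a b : Int) := by
  induction k with
  | zero =>
    intro a b hk ha hb
    have hb0 : b = 0 := by omega
    subst hb0
    rw [pyGcd]
    simp [Int.gcd, Int.natAbs_of_nonneg ha]
  | succ k ih =>
    intro a b hk ha hb
    by_cases hb0 : b = 0
    · subst hb0
      rw [pyGcd]
      simp [Int.gcd, Int.natAbs_of_nonneg ha]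
    · have hbpos : 0 < b := by omega
      rw [pyGcd]
      simp only [hb0, ne_eq, not_false_eq_true, dite_true]
      rw [PySem.Int.mod_eq_emod_of_pos hbpos]
      have h1 : 0 ≤ a % b := Int.emod_nonneg a hb0
      have h2 : a % b < b := Int.emod_lt_of_pos a hbpos
      rw [ih b (a % b) (by omega) hb h1]
      rw [Int.gcd_comm, Int.gcd_emod]

theorem lcm_mul_div_gcd (a b : Int) (ha : 0 < a) (hb : 0 < b) :
    PySem.Int.floordiv (a * b) (pyGcd a b) = (Int.lcm a b : Int) := by
  rw [pyGcd_eq b.natAbs a b le_rfl (by omega) (by omega)]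
  have hg : (0 : Int) < Int.gcd a b := by
    have := Int.gcd_pos_of_ne_zero_left b (show a ≠ 0 by omega)
    exact_mod_cast this
  have hmul : (Int.gcd a b : Int) * Int.lcm a b = a * b := by
    have := Int.gcd_mul_lcm a b
    zify [Int.natCast_natAbs] at this
    rwa [abs_of_pos ha, abs_of_pos hb] at this
  rw [PySem.Int.floordiv_eq_ediv_of_pos hg, ← hmul,
    Int.mul_ediv_cancel_left _ (by omega)]

theorem intLcm_dvd_iff (a b c : Int) :
    ((Int.lcm a b : Int) ∣ c) ↔ (a ∣ c ∧ b ∣ c) := by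
  constructor
  · intro h
    exact ⟨(Int.dvd_lcm_left a b).trans h, (Int.dvd_lcm_right a b).trans h⟩
  · intro ⟨h1, h2⟩
    exact Int.coe_lcm_dvd h1 h2

-- Loop invariant: the LCM-accumulating loop answers "lcm divides number and every
-- remaining non-zero digit divides number".
theorem altLoop_iff (number : Int) (k : Nat) : ∀ (n lcm : Int), n.toNat ≤ k → 0 < lcm →
    (CheckDivByAllDigitsAltLoop number n lcm = true ↔
      (lcm ∣ number ∧ CheckDivByAllDigitsLoop number n = true)) := by
  induction k with
  | zero =>
    intro n lcm hk hl
    have hn : ¬ 0 < n := by omega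
    rw [CheckDivByAllDigitsAltLoop, CheckDivByAllDigitsLoop]
    simp [hn, PySem.Int.mod_eq_zero_iff_dvd]
  | succ k ih =>
    intro n lcm hk hl
    by_cases hn : 0 < n
    · have hd0 : PySem.Int.mod n 10 = n % 10 :=
        PySem.Int.mod_eq_emod_of_pos (by omega)
      have hdlo : 0 ≤ n % 10 := Int.emod_nonneg n (by omega)
      have hdhi : n % 10 < 10 := Int.emod_lt_of_pos n (by omega)
      have hdiv : PySem.Int.floordiv n 10 = n / 10 :=
        PySem.Int.floordiv_eq_ediv_of_pos (by omega)
      have hrec : (n / 10).toNat ≤ k := by omega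
      rw [CheckDivByAllDigitsAltLoop, CheckDivByAllDigitsLoop]
      simp only [hn, dite_true, hd0, hdiv]
      by_cases hd : n % 10 = 0
      · simp only [hd, ne_eq, not_true_eq_false, ite_false]
        simpa using ih (n / 10) lcm hrec hl
      · have hdpos : 0 < n % 10 := by omega
        simp only [hd, ne_eq, not_false_eq_true, ite_true]
        rw [lcm_mul_div_gcd lcm (n % 10) hl hdpos]
        have hlpos : 0 < (Int.lcm lcm (n % 10) : Int) := by
          exact_mod_cast Int.lcm_pos (by omega) hd
        rw [ih (n / 10) _ hrec hlpos,
          intLcm_dvd_iff lcm (n % 10) number]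
        have hm : (PySem.Int.mod number (n % 10) = 0) ↔ (n % 10) ∣ number :=
          PySem.Int.mod_eq_zero_iff_dvd number (n % 10)
        by_cases hdn : (n % 10) ∣ number
        · simp [hm, hdn]
        · simp [hm, hdn]
    · rw [CheckDivByAllDigitsAltLoop, CheckDivByAllDigitsLoop]
      simp [hn, PySem.Int.mod_eq_zero_iff_dvd]

-- ===== VERDICT (by name: the statement is the Claim_ definition above) =====
theorem CheckDivByAllDigits_spec : Claim_equal_CheckDivByAllDigits := by
  unfold Claim_equal_CheckDivByAllDigits Spec_CheckDivByAllDigits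
  intro number _
  unfold CheckDivByAllDigits CheckDivByAllDigits_alt
  have h := altLoop_iff number number.toNat number 1 le_rfl (by omega)
  simp only [Int.one_dvd, true_and] at h
  cases hA : CheckDivByAllDigitsLoop number number
  · cases hB : CheckDivByAllDigitsAltLoop number number 1
    · rfl
    · rw [hA, hB] at h; simp at h
  · cases hB : CheckDivByAllDigitsAltLoop number number 1
    · rw [hA, hB] at h; simp at h
    · rfl
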